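-- pv_equiv track=rewrite | github.com/jlearx/pp-exercise-29 | src/main.py | checkIfConsecutive
-- ===== SOURCE A (Python) =====
-- TOWIN = 3
--
-- def checkIfConsecutive(row):
--     rowLen = len(row)
--
--     # For each element
--     for i in range(0,rowLen):
--         r1 = row[i]
--         count = 1
--
--         # Check if successive elements match
--         for r2 in row[i + 1:]:
--             if (r1 == r2):
--                 count += 1
--             else:
--                 break
--
--         if (count >= TOWIN):
--             return True
--
--     return False
-- ===== SOURCE B (Python) =====
-- TOWIN = 3
--
-- def checkIfConsecutive(row):
--     run = 0
--     prev = None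
--     for x in row:
--         if prev is not None and x == prev:
--             run += 1
--         else:
--             prev = x
--             run = 1
--         if run >= TOWIN:
--             return True
--     return False
-- ===== Notes on version B (the rewrite author's own statement) =====
-- stated objective: faster
-- what changed: Replaced the nested scan (for each index, re-scan the following equal prefix) by a single pass that tracks the current consecutive-run length.
import Mathlib
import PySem

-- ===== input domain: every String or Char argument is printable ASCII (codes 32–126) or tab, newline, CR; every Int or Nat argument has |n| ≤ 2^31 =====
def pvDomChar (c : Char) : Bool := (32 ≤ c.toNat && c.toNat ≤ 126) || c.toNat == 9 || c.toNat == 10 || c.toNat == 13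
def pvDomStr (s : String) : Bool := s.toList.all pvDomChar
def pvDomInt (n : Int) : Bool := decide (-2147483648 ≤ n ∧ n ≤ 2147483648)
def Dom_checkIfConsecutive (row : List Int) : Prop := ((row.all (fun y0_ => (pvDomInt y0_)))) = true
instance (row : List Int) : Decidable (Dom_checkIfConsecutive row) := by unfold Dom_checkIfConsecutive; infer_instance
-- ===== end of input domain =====

-- B replaces A's nested scan by one pass tracking the current consecutive-run length.

-- ===== PORT A =====
-- inner loop: 'for r2 in row[i+1:]: if r1 == r2: count += 1 else: break'
def pvInnerCount (r1 : Int) (count : Int) : List Int → Int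
  | [] => count
  | r2 :: rest => if r1 == r2 then pvInnerCount r1 (count + 1) rest else count

-- outer loop: 'for i in range(0, rowLen)'; iterating i over the indices = iterating over the
-- suffixes: r1 = row[i] is the suffix's head, row[i+1:] its tail; 'return True' = the if-branch.
def pvLoopA : List Int → Bool
  | [] => false
  | r1 :: rest => if pvInnerCount r1 1 rest ≥ 3 then true else pvLoopA rest

def checkIfConsecutive (row : List Int) : Bool := pvLoopA row

-- ===== PORT B =====
-- single pass: state (prev, run), prev = None at start; 'return True' as soon as run >= TOWIN
def pvGoB (prev : Option Int) (run : Int) : List Int → Bool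
  | [] => false
  | x :: rest =>
    if prev.isSome && some x == prev then
      if run + 1 ≥ 3 then true else pvGoB prev (run + 1) rest
    else
      if (1 : Int) ≥ 3 then true else pvGoB (some x) 1 rest

def checkIfConsecutive_alt (row : List Int) : Bool := pvGoB none 0 row

-- ===== PRECONDITION & SPEC =====
def Spec_checkIfConsecutive (row : List Int) (out : Bool) : Prop := out = checkIfConsecutive_alt row
instance (row : List Int) (out : Bool) : Decidable (Spec_checkIfConsecutive row out) := by unfold Spec_checkIfConsecutive; infer_instance

-- ===== CLAIM (what is proved, stated in full; the proofs are below) =====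
def Claim_equal_checkIfConsecutive : Prop := ∀ (row : List Int), Dom_checkIfConsecutive row → Spec_checkIfConsecutive row (checkIfConsecutive row)

-- ===== LEMMAS AND PROOFS =====

-- common reference predicate: 'some three consecutive elements are equal'
def pvThree : List Int → Bool
  | a :: b :: c :: rest => (a == b && b == c) || pvThree (b :: c :: rest)
  | _ => false

theorem pvInnerCount_ge (r1 c : Int) (l : List Int) : c ≤ pvInnerCount r1 c l := by
  induction l generalizing c with
  | nil => simp [pvInnerCount]
  | cons h t ih =>
    simp only [pvInnerCount]
    split
    · exact le_trans (by omega) (ih (c + 1))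
    · omega

theorem pvInnerCount_three (a b c : Int) (t : List Int) :
    pvInnerCount a 1 (b :: c :: t) ≥ 3 ↔ (a = b ∧ b = c) := by
  by_cases hab : a = b
  · subst hab
    by_cases hbc : a = c
    · subst hbc
      simp only [pvInnerCount, beq_self_eq_true, if_true]
      have := pvInnerCount_ge a (1 + 1 + 1) t
      exact ⟨fun _ => by simp, fun _ => by omega⟩
    · simp only [pvInnerCount, beq_self_eq_true, if_true]
      rw [if_neg (by simpa using hbc)]
      constructor
      · intro h; exact absurd h (by omega)
      · rintro ⟨_, h⟩; exact absurd h hbc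
  · simp only [pvInnerCount]
    rw [if_neg (by simpa using hab)]
    constructor
    · intro h; exact absurd h (by omega)
    · rintro ⟨h, _⟩; exact absurd h hab

theorem pvLoopA_eq_three (l : List Int) : pvLoopA l = pvThree l := by
  induction l with
  | nil => rfl
  | cons a rest ih =>
    match rest with
    | [] => simp [pvLoopA, pvInnerCount, pvThree]
    | [b] =>
      by_cases hab : a = b <;>
        norm_num [pvLoopA, pvInnerCount, pvThree, hab]
    | b :: c :: t =>
      simp only [pvLoopA, pvThree, ← ih]
      by_cases h3 : pvInnerCount a 1 (b :: c :: t) ≥ 3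
      · obtain ⟨hab, hbc⟩ := (pvInnerCount_three a b c t).mp h3
        subst hab; subst hbc
        simp [h3]
      · have hf : (a == b && b == c) = false := by
          by_cases hab : a = b <;> by_cases hbc : b = c <;>
            simp_all [pvInnerCount_three]
        simp [h3, hf]

theorem pvGoB_one_cons (p c : Int) (t : List Int) :
    pvGoB (some p) 1 (c :: t) =
      if c == p then pvGoB (some p) 2 t else pvGoB (some c) 1 t := by
  by_cases hcp : c = p <;> norm_num [pvGoB, hcp]

theorem pvGoB_two_cons (p c : Int) (t : List Int) :
    pvGoB (some p) 2 (c :: t) = if c == p then true else pvGoB (some c) 1 t := by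
  by_cases hcp : c = p <;> norm_num [pvGoB, hcp]

-- B's invariant: with run = 1 the scan decides pvThree of (prev :: remaining); with run = 2 it
-- additionally fires when the next element still equals prev.
theorem pvGoB_inv (l : List Int) : ∀ p : Int,
    pvGoB (some p) 1 l = pvThree (p :: l) ∧
    pvGoB (some p) 2 l = ((l.head? == some p) || pvThree (p :: l)) := by
  induction l with
  | nil => intro p; refine ⟨rfl, rfl⟩
  | cons c t ih =>
    intro p
    constructor
    · rw [pvGoB_one_cons]
      by_cases hcp : c = p
      · subst hcp
        rw [if_pos (by simp), (ih c).2]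
        match t with
        | [] => rfl
        | d :: t' =>
          by_cases hdc : d = c
          · subst hdc; simp [pvThree]
          · simp [pvThree, beq_eq_false_iff_ne.mpr hdc, beq_eq_false_iff_ne.mpr (Ne.symm hdc)]
      · rw [if_neg (by simpa using hcp), (ih c).1]
        match t with
        | [] => rfl
        | d :: t' => simp [pvThree, show p ≠ c from fun h => hcp h.symm]
    · rw [pvGoB_two_cons]
      by_cases hcp : c = p
      · subst hcp; simp
      · rw [if_neg (by simpa using hcp), (ih c).1]
        match t with
        | [] => simp [pvThree, hcp]
        | d :: t' => simp [pvThree, beq_eq_false_iff_ne.mpr hcp, beq_eq_false_iff_ne.mpr (Ne.symm hcp)]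

theorem alt_eq_three (row : List Int) : checkIfConsecutive_alt row = pvThree row := by
  match row with
  | [] => rfl
  | x :: rest =>
    show pvGoB none 0 (x :: rest) = _
    rw [show pvGoB none 0 (x :: rest) = pvGoB (some x) 1 rest by norm_num [pvGoB]]
    exact (pvGoB_inv rest x).1

-- ===== VERDICT (by name: the statement is the Claim_ definition above) =====
theorem checkIfConsecutive_spec : Claim_equal_checkIfConsecutive := by
  intro row _
  unfold Spec_checkIfConsecutive
  rw [alt_eq_three]
  exact pvLoopA_eq_three row
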